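-- pv_equiv track=rewrite | github.com/acquiren/Vectorization-tool | Potrace/color_trace.py | get_non_palette_color
-- ===== SOURCE A (Python) =====
-- def get_non_palette_color(palette, start_from_black=True, avoid_colors=None):
--     """
--     返回一个不在调色板内的十六进制颜色字符串
--
--     Args:
--         palette: 调色板颜色列表
--         start_from_black: 是否从黑色开始搜索，False 则从白色开始
--         avoid_colors: 需要规避的颜色列表
--
--     Returns:
--         str: 不在调色板内的十六进制颜色字符串
--
--     Raises:
--         Exception: 当调色板包含所有颜色时抛出异常
--     """
--     # 合并调色板和规避颜色
--     if avoid_colors is None: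
--         final_palette = tuple(palette)
--     else:
--         final_palette = tuple(palette) + tuple(avoid_colors)
--
--     # 确定搜索范围
--     if start_from_black:
--         color_range = range(int('ffffff', 16))
--     else:
--         color_range = range(int('ffffff', 16), 0, -1)
--
--     # 查找不在调色板中的颜色
--     for i in color_range:
--         color = "#{0:06x}".format(i)
--         if color not in final_palette:
--             return color
--
--     raise Exception("未能找到调色板之外的颜色")
-- ===== SOURCE B (Python) =====
-- def get_non_palette_color(palette, start_from_black=True, avoid_colors=None):
--     # Parse only entries that can ever equal a generated color ('#'+6 lowercase hex
--     # digits) into integers, then walk the sorted occupied values for the first gap,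
--     # instead of scanning the whole color space with a membership test per candidate.
--     if avoid_colors is None:
--         entries = list(palette)
--     else:
--         entries = list(palette) + list(avoid_colors)
--     occupied = set()
--     for s in entries:
--         if len(s) == 7 and s[0] == '#' and all(('0' <= c <= '9') or ('a' <= c <= 'f') for c in s[1:]):
--             occupied.add(int(s[1:], 16))
--     occ = sorted(occupied)
--     if start_from_black:
--         cand = 0
--         for v in occ:
--             if v == cand:
--                 cand += 1
--             elif v > cand:
--                 break
--         if cand <= 0xfffffe:
--             return "#{0:06x}".format(cand)
--     else:
--         cand = 0xffffff
--         for v in reversed(occ):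
--             if v == cand:
--                 cand -= 1
--             elif v < cand:
--                 break
--         if cand >= 1:
--             return "#{0:06x}".format(cand)
--     raise Exception("未能找到调色板之外的颜色")
-- ===== Notes on version B (the rewrite author's own statement) =====
-- stated objective: alternative
-- what changed: Instead of scanning all 2^24 candidate colors with a palette membership test each, B parses the palette entries that match the generated format '#'+6 lowercase hex digits into integers once, sorts them, and walks the sorted occupied values for the first gap (upward from 0, or downward from 0xffffff); B raises exactly where A raises, and Pre_ excludes exactly those inputs (all colors of the scanned range occupied).
import Mathlib
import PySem

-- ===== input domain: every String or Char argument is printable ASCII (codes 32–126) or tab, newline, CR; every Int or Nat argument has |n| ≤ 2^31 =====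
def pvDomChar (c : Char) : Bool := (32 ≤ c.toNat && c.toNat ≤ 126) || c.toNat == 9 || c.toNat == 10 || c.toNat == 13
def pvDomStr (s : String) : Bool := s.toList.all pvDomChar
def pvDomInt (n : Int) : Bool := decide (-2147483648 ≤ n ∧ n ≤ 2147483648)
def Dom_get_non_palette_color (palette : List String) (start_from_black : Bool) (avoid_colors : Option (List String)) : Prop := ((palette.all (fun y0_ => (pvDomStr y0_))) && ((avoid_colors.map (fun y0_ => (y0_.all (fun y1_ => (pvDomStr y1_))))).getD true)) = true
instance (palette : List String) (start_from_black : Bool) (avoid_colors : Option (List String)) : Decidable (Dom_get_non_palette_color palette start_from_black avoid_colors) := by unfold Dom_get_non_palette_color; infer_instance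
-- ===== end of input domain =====

-- B replaces A's scan over the whole 2^24 color space (a palette membership test per
-- candidate) by parsing the exact-format '#xxxxxx' palette entries to integers once and
-- walking the sorted occupied values for the first gap (alternative algorithm).


-- ===== PORT A =====
-- "{0:06x}".format(i) with '#' prepended; exact for 0 ≤ i ≤ 0xffffff (the only values formatted)
def pvHexChar (n : Int) : Char := if n < 10 then Char.ofNat (48 + n.toNat) else Char.ofNat (87 + n.toNat)
def pvFmtHex (i : Int) : String :=
  String.ofList ['#', pvHexChar (i / 1048576 % 16), pvHexChar (i / 65536 % 16),
    pvHexChar (i / 4096 % 16), pvHexChar (i / 256 % 16), pvHexChar (i / 16 % 16), pvHexChar (i % 16)]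

-- the for-loop over range(0xffffff) / range(0xffffff,0,-1) with early return; fuel = number
-- of remaining candidates; fuel 0 is Python's 'raise Exception' (excluded by Pre_)
def pvScanUp : Nat → Int → List String → String
  | 0, _, _ => ""
  | f+1, i, es => let color := pvFmtHex i
                  if es.contains color then pvScanUp f (i+1) es else color
def pvScanDown : Nat → Int → List String → String
  | 0, _, _ => ""
  | f+1, i, es => let color := pvFmtHex i
                  if es.contains color then pvScanDown f (i-1) es else color

def get_non_palette_color (palette : List String) (start_from_black : Bool) (avoid_colors : Option (List String)) : String :=
  let final_palette := match avoid_colors with | none => palette | some a => palette ++ a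
  if start_from_black then pvScanUp 16777215 0 final_palette
  else pvScanDown 16777215 16777215 final_palette

-- ===== PORT B =====
def pvHexDig (c : Char) : Bool := ('0' ≤ c && c ≤ '9') || ('a' ≤ c && c ≤ 'f')
-- int(c, 16) for a lowercase hex digit
def pvHv (c : Char) : Int := if c ≤ '9' then (c.toNat : Int) - 48 else (c.toNat : Int) - 87
-- Source B's format test (len 7, leading '#', six lowercase hex digits) + int(s[1:], 16)
def pvParseHex? (s : String) : Option Int :=
  match s.toList with
  | ['#', a, b, c, d, e, f] =>
    if pvHexDig a && pvHexDig b && pvHexDig c && pvHexDig d && pvHexDig e && pvHexDig f then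
      some (pvHv a * 1048576 + pvHv b * 65536 + pvHv c * 4096 + pvHv d * 256 + pvHv e * 16 + pvHv f)
    else none
  | _ => none

-- Source B's candidate walks over the sorted occupied values, with break
def pvWalkUp : Int → List Int → Int
  | cand, [] => cand
  | cand, v :: vs => if v = cand then pvWalkUp (cand+1) vs
                     else if v > cand then cand else pvWalkUp cand vs
def pvWalkDown : Int → List Int → Int
  | cand, [] => cand
  | cand, v :: vs => if v = cand then pvWalkDown (cand-1) vs
                     else if v < cand then cand else pvWalkDown cand vs

def get_non_palette_color_alt (palette : List String) (start_from_black : Bool) (avoid_colors : Option (List String)) : String :=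
  let entries := match avoid_colors with | none => palette | some a => palette ++ a
  let occupied : PySem.Set Int :=
    entries.foldl (fun st s => match pvParseHex? s with
                               | some v => PySem.Set.add st v
                               | none => st) []
  let occ := PySem.List.sorted occupied (fun x => x) false
  if start_from_black then
    let cand := pvWalkUp 0 occ
    if cand ≤ 16777214 then pvFmtHex cand else ""     -- else: Python raises (excluded by Pre_)
  else
    let cand := pvWalkDown 16777215 occ.reverse
    if cand ≥ 1 then pvFmtHex cand else ""            -- else: Python raises (excluded by Pre_)

-- ===== PRECONDITION & SPEC =====
-- Pre_ excludes EXACTLY the inputs on which A raises its Exception (and B raises too):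
-- the combined palette+avoid list occupies, via exact-format '#'+6-lowercase-hex-digit
-- entries, all 16777215 candidate colors of the scanned range (0..0xfffffe ascending,
-- 1..0xffffff descending); on every input A returns on, Pre_ holds.
def Pre_get_non_palette_color (palette : List String) (start_from_black : Bool) (avoid_colors : Option (List String)) : Prop :=
  (((match avoid_colors with | none => palette | some a => palette ++ a).filterMap pvParseHex?).filter
    (fun v => if start_from_black then v != 16777215 else v != 0)).dedup.length < 16777215
instance (palette : List String) (start_from_black : Bool) (avoid_colors : Option (List String)) : Decidable (Pre_get_non_palette_color palette start_from_black avoid_colors) := by unfold Pre_get_non_palette_color; infer_instance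

def pvWitness_get_non_palette_color : List String × Bool × Option (List String) :=
  (["#000000", "x"], true, some ["#000001"])

def Spec_get_non_palette_color (palette : List String) (start_from_black : Bool) (avoid_colors : Option (List String)) (out : String) : Prop := out = get_non_palette_color_alt palette start_from_black avoid_colors
instance (palette : List String) (start_from_black : Bool) (avoid_colors : Option (List String)) (out : String) : Decidable (Spec_get_non_palette_color palette start_from_black avoid_colors out) := by unfold Spec_get_non_palette_color; infer_instance

-- ===== CLAIM (what is proved, stated in full; the proofs are below) =====
def Claim_equal_get_non_palette_color : Prop := ∀ (palette : List String) (start_from_black : Bool) (avoid_colors : Option (List String)), Dom_get_non_palette_color palette start_from_black avoid_colors → Pre_get_non_palette_color palette start_from_black avoid_colors → Spec_get_non_palette_color palette start_from_black avoid_colors (get_non_palette_color palette start_from_black avoid_colors)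

-- ===== LEMMAS AND PROOFS =====

theorem pvCharLe (a b : Char) : a ≤ b ↔ a.toNat ≤ b.toNat := by
  simp [Char.le_def, UInt32.le_iff_toNat_le]

theorem pvHexChar_hv (d : Int) (h0 : 0 ≤ d) (h1 : d < 16) :
    pvHexDig (pvHexChar d) = true ∧ pvHv (pvHexChar d) = d := by
  interval_cases d <;> exact ⟨by decide, by decide⟩

theorem pvHv_hexChar (c : Char) (h : pvHexDig c = true) :
    pvHexChar (pvHv c) = c ∧ 0 ≤ pvHv c ∧ pvHv c < 16 := by
  unfold pvHexDig at h
  simp only [Bool.or_eq_true, Bool.and_eq_true, decide_eq_true_eq, pvCharLe] at h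
  have h0 : ('0' : Char).toNat = 48 := by decide
  have h9 : ('9' : Char).toNat = 57 := by decide
  have ha : ('a' : Char).toNat = 97 := by decide
  have hf : ('f' : Char).toNat = 102 := by decide
  rw [h0, h9, ha, hf] at h
  rcases h with ⟨hl, hr⟩ | ⟨hl, hr⟩
  · have hle : c ≤ '9' := (pvCharLe c '9').2 (by omega)
    have hv : pvHv c = (c.toNat : Int) - 48 := by simp [pvHv, hle]
    refine ⟨?_, by omega, by omega⟩
    rw [pvHexChar, hv, if_pos (by omega : ((c.toNat : Int) - 48) < 10)]
    have : 48 + (((c.toNat : Int) - 48).toNat) = c.toNat := by omega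
    rw [this, Char.ofNat_toNat]
  · have hle : ¬ (c ≤ '9') := fun hc => by have := (pvCharLe c '9').1 hc; rw [h9] at this; omega
    have hv : pvHv c = (c.toNat : Int) - 87 := by simp [pvHv, hle]
    refine ⟨?_, by omega, by omega⟩
    rw [pvHexChar, hv, if_neg (by omega : ¬ ((c.toNat : Int) - 87) < 10)]
    have : 87 + (((c.toNat : Int) - 87).toNat) = c.toNat := by omega
    rw [this, Char.ofNat_toNat]

theorem pvParse_fmt (i : Int) (h0 : 0 ≤ i) (h1 : i ≤ 16777215) :
    pvParseHex? (pvFmtHex i) = some i := by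
  have d1 := pvHexChar_hv (i / 1048576 % 16) (by omega) (by omega)
  have d2 := pvHexChar_hv (i / 65536 % 16) (by omega) (by omega)
  have d3 := pvHexChar_hv (i / 4096 % 16) (by omega) (by omega)
  have d4 := pvHexChar_hv (i / 256 % 16) (by omega) (by omega)
  have d5 := pvHexChar_hv (i / 16 % 16) (by omega) (by omega)
  have d6 := pvHexChar_hv (i % 16) (by omega) (by omega)
  simp only [pvParseHex?, pvFmtHex, String.toList_ofList, d1.1, d2.1, d3.1, d4.1, d5.1, d6.1,
    Bool.and_self, if_pos, d1.2, d2.2, d3.2, d4.2, d5.2, d6.2]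
  congr 1
  omega

theorem pvFmt_parse (s : String) (i : Int) (h : pvParseHex? s = some i) :
    pvFmtHex i = s ∧ 0 ≤ i ∧ i ≤ 16777215 := by
  unfold pvParseHex? at h
  split at h
  case h_2 => exact absurd h (by simp)
  case h_1 a b c d e f heq =>
    by_cases hcond : (pvHexDig a && pvHexDig b && pvHexDig c && pvHexDig d && pvHexDig e && pvHexDig f) = true
    · rw [if_pos hcond] at h
      have hi : pvHv a * 1048576 + pvHv b * 65536 + pvHv c * 4096 + pvHv d * 256 + pvHv e * 16 + pvHv f = i :=
        Option.some.inj h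
      simp only [Bool.and_eq_true] at hcond
      obtain ⟨⟨⟨⟨⟨haD, hbD⟩, hcD⟩, hdD⟩, heD⟩, hfD⟩ := hcond
      obtain ⟨ea, ba1, ba2⟩ := pvHv_hexChar a haD
      obtain ⟨eb, bb1, bb2⟩ := pvHv_hexChar b hbD
      obtain ⟨ec, bc1, bc2⟩ := pvHv_hexChar c hcD
      obtain ⟨ed, bd1, bd2⟩ := pvHv_hexChar d hdD
      obtain ⟨ee, be1, be2⟩ := pvHv_hexChar e heD
      obtain ⟨ef, bf1, bf2⟩ := pvHv_hexChar f hfD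
      refine ⟨?_, by omega, by omega⟩
      have e1 : i / 1048576 % 16 = pvHv a := by omega
      have e2 : i / 65536 % 16 = pvHv b := by omega
      have e3 : i / 4096 % 16 = pvHv c := by omega
      have e4 : i / 256 % 16 = pvHv d := by omega
      have e5 : i / 16 % 16 = pvHv e := by omega
      have e6 : i % 16 = pvHv f := by omega
      rw [pvFmtHex, e1, e2, e3, e4, e5, e6, ea, eb, ec, ed, ee, ef, ← heq]
      simp
    · rw [if_neg hcond] at h; exact absurd h (by simp)

-- contains of a generated color ↔ its integer is among the parsed entries
theorem pvContains_iff (es : List String) (i : Int) (h0 : 0 ≤ i) (h1 : i ≤ 16777215) :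
    es.contains (pvFmtHex i) = true ↔ i ∈ es.filterMap pvParseHex? := by
  rw [List.contains_iff_mem, List.mem_filterMap]
  constructor
  · intro hm; exact ⟨pvFmtHex i, hm, pvParse_fmt i h0 h1⟩
  · rintro ⟨s, hs, hp⟩; rw [(pvFmt_parse s i hp).1]; exact hs

theorem pvFold_add (es : List String) (st : PySem.Set Int) :
    es.foldl (fun st s => match pvParseHex? s with
                          | some v => PySem.Set.add st v
                          | none => st) st
      = (es.filterMap pvParseHex?).foldl PySem.Set.add st := by
  induction es generalizing st with
  | nil => rfl
  | cons s es ih =>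
    cases hp : pvParseHex? s <;> simp [hp, ih]

-- walk characterisations
theorem pvWalkUp_char (S : List Int) (c : Int) (hS : S.Pairwise (· < ·)) :
    c ≤ pvWalkUp c S ∧ pvWalkUp c S ≤ c + S.length ∧ pvWalkUp c S ∉ S ∧
      ∀ m, c ≤ m → m < pvWalkUp c S → m ∈ S := by
  induction S generalizing c with
  | nil => simp [pvWalkUp]
  | cons v vs ih =>
    have hvvs : ∀ x ∈ vs, v < x := (List.pairwise_cons.1 hS).1
    have hpw := (List.pairwise_cons.1 hS).2
    by_cases hv : v = c
    · obtain ⟨h1, h2, h3, h4⟩ := ih (c+1) hpw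
      refine ⟨by simpa [pvWalkUp, hv] using by omega, ?_, ?_, ?_⟩
      · have he : pvWalkUp c (v :: vs) = pvWalkUp (c+1) vs := by simp [pvWalkUp, hv]
        rw [he, List.length_cons]
        push_cast
        omega
      · simp only [pvWalkUp, hv, if_true]
        intro hc
        rcases List.mem_cons.1 hc with h | h
        · omega
        · exact h3 h
      · simp only [pvWalkUp, hv, if_true]
        intro m hm1 hm2
        rcases eq_or_lt_of_le hm1 with h | h
        · exact List.mem_cons.2 (Or.inl (by omega))
        · exact List.mem_cons.2 (Or.inr (h4 m (by omega) hm2))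
    · by_cases hgt : v > c
      · refine ⟨?_, ?_, ?_, ?_⟩ <;> simp only [pvWalkUp, if_neg hv, if_pos hgt]
        · omega
        · simp; omega
        · intro hc
          rcases List.mem_cons.1 hc with h | h
          · omega
          · exact absurd (hvvs _ h) (by omega)
        · intro m hm1 hm2; omega
      · obtain ⟨h1, h2, h3, h4⟩ := ih c hpw
        refine ⟨?_, ?_, ?_, ?_⟩ <;> simp only [pvWalkUp, if_neg hv, if_neg hgt]
        · omega
        · simp; omega
        · intro hc
          rcases List.mem_cons.1 hc with h | h
          · omega
          · exact h3 h
        · intro m hm1 hm2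
          exact List.mem_cons.2 (Or.inr (h4 m hm1 hm2))

theorem pvWalkDown_char (S : List Int) (c : Int) (hS : S.Pairwise (· > ·)) :
    pvWalkDown c S ≤ c ∧ c - S.length ≤ pvWalkDown c S ∧ pvWalkDown c S ∉ S ∧
      ∀ m, m ≤ c → pvWalkDown c S < m → m ∈ S := by
  induction S generalizing c with
  | nil => simp [pvWalkDown]
  | cons v vs ih =>
    have hvvs : ∀ x ∈ vs, v > x := (List.pairwise_cons.1 hS).1
    have hpw := (List.pairwise_cons.1 hS).2
    by_cases hv : v = c
    · obtain ⟨h1, h2, h3, h4⟩ := ih (c-1) hpw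
      refine ⟨by simpa [pvWalkDown, hv] using by omega, ?_, ?_, ?_⟩
      · have he : pvWalkDown c (v :: vs) = pvWalkDown (c-1) vs := by simp [pvWalkDown, hv]
        rw [he, List.length_cons]
        push_cast
        omega
      · simp only [pvWalkDown, hv, if_true]
        intro hc
        rcases List.mem_cons.1 hc with h | h
        · omega
        · exact h3 h
      · simp only [pvWalkDown, hv, if_true]
        intro m hm1 hm2
        rcases eq_or_lt_of_le hm1 with h | h
        · exact List.mem_cons.2 (Or.inl (by omega))
        · exact List.mem_cons.2 (Or.inr (h4 m (by omega) hm2))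
    · by_cases hlt : v < c
      · refine ⟨?_, ?_, ?_, ?_⟩ <;> simp only [pvWalkDown, if_neg hv, if_pos hlt]
        · omega
        · simp; omega
        · intro hc
          rcases List.mem_cons.1 hc with h | h
          · omega
          · exact absurd (hvvs _ h) (by omega)
        · intro m hm1 hm2; omega
      · obtain ⟨h1, h2, h3, h4⟩ := ih c hpw
        refine ⟨?_, ?_, ?_, ?_⟩ <;> simp only [pvWalkDown, if_neg hv, if_neg hlt]
        · omega
        · simp; omega
        · intro hc
          rcases List.mem_cons.1 hc with h | h
          · omega
          · exact h3 h
        · intro m hm1 hm2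
          exact List.mem_cons.2 (Or.inr (h4 m hm1 hm2))

-- scan characterisations: the loop returns the formatted first admissible value
theorem pvScanUp_char (f : Nat) (i m : Int) (es : List String)
    (him : i ≤ m) (hmf : m < i + f)
    (hm : es.contains (pvFmtHex m) = false)
    (hall : ∀ j, i ≤ j → j < m → es.contains (pvFmtHex j) = true) :
    pvScanUp f i es = pvFmtHex m := by
  induction f generalizing i with
  | zero => omega
  | succ f ih =>
    by_cases hc : es.contains (pvFmtHex i) = true
    · have : i ≠ m := fun h => by rw [h, hm] at hc; cases hc
      simp only [pvScanUp, hc, if_pos]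
      exact ih (i+1) (by omega) (by omega) (fun j hj1 hj2 => hall j (by omega) hj2)
    · have : i = m := by
        by_contra hne
        exact hc (hall i le_rfl (by omega))
      simp only [pvScanUp, if_neg hc]
      rw [this]

theorem pvScanDown_char (f : Nat) (i m : Int) (es : List String)
    (him : m ≤ i) (hmf : i < m + f)
    (hm : es.contains (pvFmtHex m) = false)
    (hall : ∀ j, m < j → j ≤ i → es.contains (pvFmtHex j) = true) :
    pvScanDown f i es = pvFmtHex m := by
  induction f generalizing i with
  | zero => omega
  | succ f ih =>
    by_cases hc : es.contains (pvFmtHex i) = true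
    · have : i ≠ m := fun h => by rw [h, hm] at hc; cases hc
      simp only [pvScanDown, hc, if_pos]
      exact ih (i-1) (by omega) (by omega) (fun j hj1 hj2 => hall j hj1 (by omega))
    · have : i = m := by
        by_contra hne
        exact hc (hall i (by omega) le_rfl)
      simp only [pvScanDown, if_neg hc]
      rw [this]

-- counting: a list that contains 16777215 distinct integers has dedup length ≥ 16777215
theorem pvCount_lower (F : List Int) (g : Nat → Int) (hg : Function.Injective g)
    (h : ∀ k, k < 16777215 → g k ∈ F) : 16777215 ≤ F.dedup.length := by
  have hsub : (List.range 16777215).map g ⊆ F.dedup := by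
    intro x hx
    obtain ⟨k, hk, rfl⟩ := List.mem_map.1 hx
    exact List.mem_dedup.2 (h k (List.mem_range.1 hk))
  have hnd : ((List.range 16777215).map g).Nodup := (List.nodup_range).map hg
  have := (List.subperm_of_subset hnd hsub).length_le
  simpa using this

-- ===== VERDICT (by name: the statement is the Claim_ definition above) =====
theorem get_non_palette_color_spec : Claim_equal_get_non_palette_color := by
  intro palette start_from_black avoid_colors _hdom hpre
  obtain ⟨es, hes⟩ : ∃ es, (match avoid_colors with | none => palette | some a => palette ++ a) = es :=
    ⟨_, rfl⟩
  unfold Pre_get_non_palette_color at hpre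
  rw [hes] at hpre
  unfold Spec_get_non_palette_color
  simp only [get_non_palette_color, get_non_palette_color_alt, hes]
  set L : List Int := es.filterMap pvParseHex? with hL
  have hocceq : (es.foldl (fun st s => match pvParseHex? s with
      | some v => PySem.Set.add st v | none => st) ([] : PySem.Set Int)) = PySem.Set.ofList L := by
    rw [pvFold_add]; rfl
  rw [hocceq]
  set occ := PySem.List.sorted (PySem.Set.ofList L) (fun x => x) false with hocc
  have hpair : occ.Pairwise (· < ·) := by
    rw [hocc]; exact PySem.List.sorted_ofList_pairwise_lt L
  have hmemocc : ∀ x, x ∈ occ ↔ x ∈ L := by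
    intro x
    rw [hocc, PySem.List.mem_sorted, PySem.Set.mem_ofList]
  cases start_from_black with
  | true =>
    simp only [if_true] at hpre ⊢
    obtain ⟨h1, h2, h3, h4⟩ := pvWalkUp_char occ 0 hpair
    set M := pvWalkUp 0 occ with hM
    have hMle : M ≤ 16777214 := by
      by_contra hbig
      refine absurd (pvCount_lower (L.filter (fun v => v != 16777215)) (fun k => (k : Int))
        (fun a b h => by have h' : (a : Int) = (b : Int) := h; omega) ?_) (by omega)
      intro k hk
      refine List.mem_filter.2 ⟨(hmemocc _).1 (h4 (k : Int) (by omega) (by omega)), ?_⟩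
      simp only [bne_iff_ne, ne_eq]
      omega
    rw [if_pos (by omega)]
    refine pvScanUp_char 16777215 0 M es h1 (by omega) ?_ ?_
    · rw [← Bool.not_eq_true]
      intro hc
      exact h3 ((hmemocc M).2 ((pvContains_iff es M (by omega) (by omega)).1 hc))
    · intro j hj1 hj2
      exact (pvContains_iff es j hj1 (by omega)).2 ((hmemocc j).1 (h4 j hj1 hj2))
  | false =>
    simp only [Bool.false_eq_true, if_false] at hpre ⊢
    have hpairr : occ.reverse.Pairwise (· > ·) := by
      rw [List.pairwise_reverse]; exact hpair
    obtain ⟨h1, h2, h3, h4⟩ := pvWalkDown_char occ.reverse 16777215 hpairr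
    set M := pvWalkDown 16777215 occ.reverse with hM
    have hMge : 1 ≤ M := by
      by_contra hsmall
      refine absurd (pvCount_lower (L.filter (fun v => v != 0)) (fun k => (k : Int) + 1)
        (fun a b h => by have h' : (a : Int) + 1 = (b : Int) + 1 := h; omega) ?_) (by omega)
      intro k hk
      have hmem : ((k : Int) + 1) ∈ occ.reverse := h4 ((k : Int) + 1) (by omega) (by omega)
      refine List.mem_filter.2 ⟨(hmemocc _).1 (List.mem_reverse.1 hmem), ?_⟩
      simp only [bne_iff_ne, ne_eq]
      omega
    rw [if_pos (by omega)]
    refine pvScanDown_char 16777215 16777215 M es h1 (by omega) ?_ ?_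
    · rw [← Bool.not_eq_true]
      intro hc
      exact h3 (List.mem_reverse.2 ((hmemocc M).2 ((pvContains_iff es M (by omega) (by omega)).1 hc)))
    · intro j hj1 hj2
      exact (pvContains_iff es j (by omega) hj2).2
        ((hmemocc j).1 (List.mem_reverse.1 (h4 j hj2 hj1)))
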